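-- pv_equiv track=rewrite | github.com/yougi8/CodingTestStudy | 프로그래머스/롤케이크자르기.py | solution
-- ===== SOURCE A (Python) =====
-- def solution(topping):
--     answer = 0
--
--     # 토핑을 처음에 한명에게 몰빵. 다양성만 체크할 거니까 set으로
--     left = set()
--     right = set(topping)
--     count = {}
--
--     # 토핑이 각 몇개씩 있는지 저장 (오른쪽이 가지고 있는 토핑의 개수가 되겠지)
--     for i in topping:
--         if i in count:
--             count[i] += 1
--         else:
--             count[i] = 1
--
--     # 토핑을 하나씩 상대에게 넘겨주면서 다양성 체크
--     for top in topping: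
--         left.add(top)  # 왼쪽 토핑 리스트에 한개 줌
--         count[top] -= 1  # 토핑개수 저장된 리스트에서 해당 토핑 개수 1개 삭제
--
--         # 만약에 오른쪽이 가지고 있는 토핑의 개수가 0이 된다면 -> 오른쪽은 그 토핑을 안가지고 있는 것.
--         # 오른쪽 토핑 셋에서 삭제시켜줘야 함
--         if count[top] == 0:
--             right.remove(top)
--         if len(left) == len(right):
--             answer += 1
--     return answer
-- ===== SOURCE B (Python) =====
-- def solution(topping):
--     # suffix-distinct table: suf[i] = number of distinct toppings in topping[i:]
--     suf = []
--     seen = set()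
--     for t in reversed(topping):
--         seen.add(t)
--         suf.append(len(seen))
--     suf.reverse()
--     tails = suf[1:] + [0]  # tails[i] = distinct count of topping[i+1:]
--     answer = 0
--     pre = set()
--     for t, r in zip(topping, tails):
--         pre.add(t)
--         if len(pre) == r:
--             answer += 1
--     return answer
-- ===== Notes on version B (the rewrite author's own statement) =====
-- stated objective: alternative
-- what changed: Replaces A's single pass that maintains a multiplicity dict and incrementally shrinks the right-hand set by two independent passes: a right-to-left pass building a suffix-distinct table, then a left-to-right prefix scan compared against that table (no dict, no element removal). (measured ~1.9x faster at the largest size: no per-element dict updates/lookups in the main loop)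
import Mathlib
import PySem

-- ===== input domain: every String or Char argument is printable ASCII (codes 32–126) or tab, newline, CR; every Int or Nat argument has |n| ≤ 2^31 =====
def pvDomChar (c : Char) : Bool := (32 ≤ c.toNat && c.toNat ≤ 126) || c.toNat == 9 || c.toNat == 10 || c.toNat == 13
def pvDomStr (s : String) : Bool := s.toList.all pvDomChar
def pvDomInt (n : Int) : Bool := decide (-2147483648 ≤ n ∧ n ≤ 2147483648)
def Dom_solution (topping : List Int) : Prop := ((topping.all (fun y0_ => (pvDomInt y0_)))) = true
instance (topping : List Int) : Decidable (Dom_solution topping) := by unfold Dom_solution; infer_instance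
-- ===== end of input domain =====

-- B replaces A's single pass (count dict + incremental right set) by two passes: a suffix-distinct
-- table built right-to-left, then a prefix scan comparing against it (objective: alternative decomposition).

-- ===== PORT A =====
-- the 'for top in topping' loop of A; state = (left, count, right, answer)
-- (count[top] -= 1 is a KeyError-free dict update here — every element of topping is a key of count —
--  so Dict.modify with default 0 is exact; likewise right.remove(top) only fires when top ∈ right, so Set.discard is exact)
def solutionLoop : List Int → PySem.Set Int → PySem.Dict Int Int → PySem.Set Int → Int → Int
  | [], _, _, _, answer => answer
  | top :: rest, left, count, right, answer =>
    let left := PySem.Set.add left top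
    let count := count.modify top 0 (· - 1)
    let right := if count.getD top 0 == 0 then PySem.Set.discard right top else right
    let answer := if PySem.Set.len left == PySem.Set.len right then answer + 1 else answer
    solutionLoop rest left count right answer

def solution (topping : List Int) : Int :=
  let right : PySem.Set Int := PySem.Set.ofList topping
  -- 'for i in topping: if i in count: count[i] += 1 else: count[i] = 1'
  let count : PySem.Dict Int Int :=
    topping.foldl (fun d i => if d.contains i then d.modify i 0 (· + 1) else d.insert i 1) PySem.Dict.empty
  solutionLoop topping PySem.Set.empty count right 0

-- ===== PORT B =====
-- right-to-left pass of B: returns (suf, seen) where suf[i] = len of distinct toppings in topping[i:]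
def sufA : List Int → List Int × PySem.Set Int
  | [] => ([], PySem.Set.empty)
  | t :: rest =>
    let p := sufA rest
    let seen := PySem.Set.add p.2 t
    (PySem.Set.len seen :: p.1, seen)

-- forward pass of B over zip(topping, tails)
def loopB : List Int → List Int → PySem.Set Int → Int → Int
  | t :: ts, r :: rs, pre, answer =>
    let pre := PySem.Set.add pre t
    loopB ts rs pre (if PySem.Set.len pre == r then answer + 1 else answer)
  | _, _, _, answer => answer

def solution_alt (topping : List Int) : Int :=
  let suf := (sufA topping).1
  let tails := suf.drop 1 ++ [(0 : Int)]   -- tails[i] = distinct count of topping[i+1:]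
  loopB topping tails PySem.Set.empty 0

-- ===== PRECONDITION & SPEC =====
def Spec_solution (topping : List Int) (out : Int) : Prop := out = solution_alt topping
instance (topping : List Int) (out : Int) : Decidable (Spec_solution topping out) := by unfold Spec_solution; infer_instance

-- ===== CLAIM (what is proved, stated in full; the proofs are below) =====
def Claim_equal_solution : Prop := ∀ (topping : List Int), Dom_solution topping → Spec_solution topping (solution topping)

-- ===== LEMMAS AND PROOFS =====

-- A's counter-building step is exactly the Counter step (insert of a fresh key = modify with default 0)
lemma countStep_eq (d : PySem.Dict Int Int) (i : Int) :
    (if d.contains i then d.modify i 0 (· + 1) else d.insert i 1) = d.modify i 0 (· + 1) := by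
  cases h : d.contains i with
  | true => simp
  | false => simp [PySem.Dict.modify, PySem.Dict.getD_of_not_contains d 0 h]

lemma countBuild_getD (l : List Int) (v : Int) :
    (l.foldl (fun d i => if d.contains i then d.modify i 0 (· + 1) else d.insert i 1)
        PySem.Dict.empty).getD v 0 = (l.count v : Int) := by
  have h : l.foldl (fun d i => if d.contains i then d.modify i 0 (· + 1) else d.insert i 1)
        (PySem.Dict.empty : PySem.Dict Int Int)
      = l.foldl (fun d i => d.modify i 0 (· + 1)) (PySem.Dict.empty : PySem.Dict Int Int) := by
    congr 1; funext d i; exact countStep_eq d i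
  rw [h]
  simpa using PySem.Dict.getD_foldl_modify_add_one l (PySem.Dict.empty : PySem.Dict Int Int) v

-- B's seen-set after the right-to-left pass: nodup, members = members of the suffix
lemma sufA_set (l : List Int) :
    (sufA l).2.Nodup ∧ ∀ x : Int, x ∈ (sufA l).2 ↔ x ∈ l := by
  induction l with
  | nil => simp [sufA, PySem.Set.empty]
  | cons t rest ih =>
    refine ⟨PySem.Set.nodup_add _ _ ih.1, fun x => ?_⟩
    rw [show (sufA (t :: rest)).2 = PySem.Set.add (sufA rest).2 t from rfl, PySem.Set.mem_add]
    rw [ih.2 x]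
    simp [List.mem_cons]; tauto

lemma len_eq_of_same_members (s t : List Int) (hs : s.Nodup) (ht : t.Nodup)
    (h : ∀ x, x ∈ s ↔ x ∈ t) : s.length = t.length :=
  ((List.perm_ext_iff_of_nodup hs ht).2 h).length_eq

-- the bisimulation: A's loop over the suffix s equals B's forward loop over s with B's suffix table,
-- given A's invariants (count = multiset of s, right = distinct elements of s)
lemma bisim (s : List Int) : ∀ (count : PySem.Dict Int Int) (right pre : PySem.Set Int) (ans : Int),
    (∀ x, count.getD x 0 = (s.count x : Int)) →
    right.Nodup → (∀ x, x ∈ right ↔ x ∈ s) →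
    solutionLoop s pre count right ans = loopB s ((sufA s).1.drop 1 ++ [(0 : Int)]) pre ans := by
  induction s with
  | nil =>
    intro count right pre ans _ _ _
    simp [solutionLoop, loopB]
  | cons top rest ih =>
    intro count right pre ans hc hnd hm
    -- the new count invariant
    have hc' : ∀ x, (count.modify top 0 (· - 1)).getD x 0 = (rest.count x : Int) := by
      intro x
      rw [PySem.Dict.getD_modify]
      by_cases hx : x = top
      · subst hx; rw [if_pos rfl, hc]; push_cast [List.count_cons]; simp
      · rw [if_neg hx, hc x]
        rw [List.count_cons, if_neg (by simpa using fun h => hx h.symm)]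
        simp
    set right' : PySem.Set Int :=
      if (count.modify top 0 (· - 1)).getD top 0 == 0 then PySem.Set.discard right top else right
      with hr'
    -- the new right invariants
    have hnd' : right'.Nodup := by
      rw [hr']; split
      · exact PySem.Set.nodup_discard _ _ hnd
      · exact hnd
    have hm' : ∀ x, x ∈ right' ↔ x ∈ rest := by
      intro x
      rw [hr']
      have hct : (count.modify top 0 (· - 1)).getD top 0 = (rest.count top : Int) := hc' top
      by_cases h0 : rest.count top = 0
      · have hnotin : top ∉ rest := List.count_eq_zero.mp h0
        rw [if_pos (by rw [hct, h0]; rfl), PySem.Set.mem_discard, hm x]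
        constructor
        · rintro ⟨hx, hne⟩; rcases List.mem_cons.mp hx with h | h
          · exact absurd h hne
          · exact h
        · intro hx; exact ⟨List.mem_cons_of_mem _ hx, fun he => hnotin (he ▸ hx)⟩
      · have hin : top ∈ rest := List.count_pos_iff.mp (Nat.pos_of_ne_zero h0)
        rw [if_neg (by rw [hct]; simpa using fun he => h0 (by exact_mod_cast he)), hm x]
        constructor
        · intro hx; rcases List.mem_cons.mp hx with h | h
          · exact h ▸ hin
          · exact h
        · exact List.mem_cons_of_mem _
    -- the two comparison values are equal
    have hlen : PySem.Set.len right' = ((sufA rest).2.length : Int) := by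
      have := len_eq_of_same_members right' (sufA rest).2 hnd' (sufA_set rest).1
        (fun x => (hm' x).trans ((sufA_set rest).2 x).symm)
      simp [PySem.Set.len, this]
    cases rest with
    | nil =>
      have hr0 : right' = [] := by
        apply List.eq_nil_iff_forall_not_mem.mpr
        intro x hx; exact absurd ((hm' x).mp hx) (List.not_mem_nil)
      show solutionLoop []
          (PySem.Set.add pre top) (count.modify top 0 (· - 1)) right'
          (if PySem.Set.len (PySem.Set.add pre top) == PySem.Set.len right' then ans + 1 else ans)
        = loopB [] [] (PySem.Set.add pre top)
          (if PySem.Set.len (PySem.Set.add pre top) == (0 : Int) then ans + 1 else ans)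
      rw [hr0]
      simp [solutionLoop, loopB, PySem.Set.len]
    | cons t' r'' =>
      -- unfold one step on both sides and apply the IH
      show solutionLoop (t' :: r'')
          (PySem.Set.add pre top) (count.modify top 0 (· - 1)) right'
          (if PySem.Set.len (PySem.Set.add pre top) == PySem.Set.len right' then ans + 1 else ans)
        = loopB (t' :: r'') ((sufA (t' :: r'')).1.drop 1 ++ [(0 : Int)]) (PySem.Set.add pre top)
          (if PySem.Set.len (PySem.Set.add pre top) == PySem.Set.len (sufA (t' :: r'')).2 then ans + 1 else ans)
      rw [ih _ right' _ _ hc' hnd' hm']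
      have : PySem.Set.len right' = PySem.Set.len (sufA (t' :: r'')).2 := by
        rw [hlen]; rfl
      rw [this]

-- ===== VERDICT (by name: the statement is the Claim_ definition above) =====
theorem solution_spec : Claim_equal_solution := by
  intro topping _
  show solution topping = solution_alt topping
  unfold solution solution_alt
  exact bisim topping _ _ _ _ (fun x => countBuild_getD topping x)
    (PySem.Set.nodup_ofList topping) (fun x => PySem.Set.mem_ofList topping x)
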